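-- pv_equiv track=rewrite | github.com/cal65/advent-of-code | 2021/day3.py | calculate_gamma_epsilon
-- ===== SOURCE A (Python) =====
-- def parse_number(number, position):
--     return number[position]
--
-- def parse_list(binary_list, position):
--     numbers = [parse_number(x, position) for x in binary_list]
--     return numbers
--
-- def binary_mode(numbers, type):
--     if type not in ["most", "least"]:
--         raise ValueError("type must be either 'most' or 'least'")
--     uniques = set()
--     counts = {}
--     for n in numbers:
--         if n not in uniques:
--             uniques.add(n)
--             counts[n] = 1
--         else:
--             counts[n] += 1
--     if type == "most":
--         rate = max(counts, key=counts.get)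
--     elif type == "least":
--         rate = min(counts, key=counts.get)
--     return rate
--
-- def calculate_gamma_epsilon(binary_list):
--     num_positions = len(binary_list[0])
--     most = []
--     least = []
--     for i in range(0, num_positions):
--         numbers = parse_list(binary_list, i)
--         most.append(binary_mode(numbers, "most"))
--         least.append(binary_mode(numbers, "least"))
--     return_dict = {"gamma": binaryToDecimal(most), "epsilon": binaryToDecimal(least)}
--     return return_dict
--
-- def binaryToDecimal(binary):
--     """
--     binary is a string of 0s and 1s
--     """
--     value = 0
--     n = len(binary)
--     for i in range(0, n):
--         value += int(binary[n - i - 1]) * 2 ** i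
--     return value
-- ===== SOURCE B (Python) =====
-- def calculate_gamma_epsilon(binary_list):
--     width = len(binary_list[0])
--     cols = [{} for _ in range(width)]
--     for row in binary_list:
--         cols = [{**col, c: col.get(c, 0) + 1} for col, c in zip(cols, row)]
--     gamma = 0
--     epsilon = 0
--     for col in cols:
--         gamma = 2 * gamma + int(max(col, key=col.get))
--         epsilon = 2 * epsilon + int(min(col, key=col.get))
--     return {"gamma": gamma, "epsilon": epsilon}
-- ===== Notes on version B (the rewrite author's own statement) =====
-- stated objective: alternative
-- what changed: Replaces the per-position outer loop that re-extracts and re-counts every column with a single pass over the rows maintaining one insertion-order count dict per column, and replaces the positional digit*2**i sums with Horner accumulation (2*acc+digit) over the column modes.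
import Mathlib
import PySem

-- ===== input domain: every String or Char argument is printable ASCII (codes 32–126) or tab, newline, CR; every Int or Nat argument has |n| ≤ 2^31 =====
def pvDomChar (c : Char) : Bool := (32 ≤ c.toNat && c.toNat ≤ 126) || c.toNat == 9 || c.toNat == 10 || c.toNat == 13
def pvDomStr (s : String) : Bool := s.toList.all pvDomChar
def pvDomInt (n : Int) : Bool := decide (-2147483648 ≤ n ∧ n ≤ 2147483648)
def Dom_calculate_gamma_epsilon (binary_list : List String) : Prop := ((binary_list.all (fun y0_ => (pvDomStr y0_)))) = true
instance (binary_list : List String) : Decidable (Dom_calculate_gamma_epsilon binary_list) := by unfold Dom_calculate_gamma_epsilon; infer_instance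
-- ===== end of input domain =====

-- B replaces A's per-position column re-extraction/re-counting with one pass over the rows
-- keeping a count dict per column, and Horner accumulation instead of positional power sums
-- (alternative decomposition, same asymptotic cost).


-- ===== PORT A =====
-- int(x) for a single character x; ValueError (non-digit) is excluded by Pre_
def pvIntOfChar (c : Char) : Int := (PySem.Int.ofChars? [c]).getD 0

def pvParseNumber (number : String) (position : Int) : Char :=
  (PySem.Str.pyGet? number position).getD ' '   -- IndexError excluded by Pre_

def pvParseList (binary_list : List String) (position : Int) : List Char :=
  binary_list.map (fun x => pvParseNumber x position)

-- binary_mode(numbers, type); the ValueError branch for a bad `type` is unreachable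
-- (only called with the literals "most"/"least")
def pvBinaryMode (numbers : List Char) (ty : String) : Char :=
  let st := numbers.foldl
    (fun (st : PySem.Set Char × PySem.Dict Char Int) n =>
      if st.1.contains n = false then (st.1.add n, st.2.insert n 1)
      else (st.1, st.2.modify n 0 (· + 1)))
    ((PySem.Set.ofList []), PySem.Dict.empty)
  let counts := st.2
  if ty == "most" then
    (PySem.List.max? counts.keys (fun k => counts.getD k 0)).getD ' '   -- max(counts, key=counts.get); empty counts excluded by Pre_
  else
    (PySem.List.min? counts.keys (fun k => counts.getD k 0)).getD ' '

def pvBinaryToDecimal (binary : List Char) : Int :=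
  let n := binary.length
  (PySem.List.pyRange 0 (n : Int)).foldl
    (fun value i =>
      value + pvIntOfChar ((PySem.List.pyGet? binary ((n : Int) - i - 1)).getD ' ') * 2 ^ i.toNat)
    0

def calculate_gamma_epsilon (binary_list : List String) : List (String × Int) :=
  let num_positions := (binary_list.headD "").toList.length   -- len(binary_list[0]); [] excluded by Pre_
  let ml := (PySem.List.pyRange 0 (num_positions : Int)).foldl
    (fun (ml : List Char × List Char) i =>
      let numbers := pvParseList binary_list i
      (ml.1 ++ [pvBinaryMode numbers "most"], ml.2 ++ [pvBinaryMode numbers "least"]))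
    ([], [])
  [("gamma", pvBinaryToDecimal ml.1), ("epsilon", pvBinaryToDecimal ml.2)]

-- ===== PORT B =====
def calculate_gamma_epsilon_alt (binary_list : List String) : List (String × Int) :=
  let width := (binary_list.headD "").toList.length   -- len(binary_list[0]); [] excluded by Pre_
  let cols := binary_list.foldl
    (fun (cols : List (PySem.Dict Char Int)) row =>
      (cols.zip row.toList).map (fun p => p.1.insert p.2 (p.1.getD p.2 0 + 1)))
    (List.replicate width PySem.Dict.empty)
  let ge := cols.foldl
    (fun (ge : Int × Int) col =>
      (2 * ge.1 + pvIntOfChar ((PySem.List.max? col.keys (fun k => col.getD k 0)).getD ' '),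
       2 * ge.2 + pvIntOfChar ((PySem.List.min? col.keys (fun k => col.getD k 0)).getD ' ')))
    (0, 0)
  [("gamma", ge.1), ("epsilon", ge.2)]

-- ===== PRECONDITION & SPEC =====
-- Pre_ excludes the empty list and rows shorter than the first row (A raises IndexError there), and
-- inputs with a non-digit character in the first len(binary_list[0]) columns: on most of those A
-- raises ValueError in int(); on a few (where no non-digit character is a column mode) A still
-- returns, but digit-only content is the function's intended binary-string domain.
def Pre_calculate_gamma_epsilon (binary_list : List String) : Prop :=
  binary_list ≠ [] ∧
  ∀ s ∈ binary_list,
    (binary_list.headD "").toList.length ≤ s.toList.length ∧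
    ((s.toList.take (binary_list.headD "").toList.length).all (fun c => c.isDigit)) = true
instance (binary_list : List String) : Decidable (Pre_calculate_gamma_epsilon binary_list) := by unfold Pre_calculate_gamma_epsilon; infer_instance

def pvWitness_calculate_gamma_epsilon : List String := ["0110", "1010", "1111"]

def Spec_calculate_gamma_epsilon (binary_list : List String) (out : List (String × Int)) : Prop := out = calculate_gamma_epsilon_alt binary_list
instance (binary_list : List String) (out : List (String × Int)) : Decidable (Spec_calculate_gamma_epsilon binary_list out) := by unfold Spec_calculate_gamma_epsilon; infer_instance

-- ===== CLAIM (what is proved, stated in full; the proofs are below) =====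
def Claim_equal_calculate_gamma_epsilon : Prop := ∀ (binary_list : List String), Dom_calculate_gamma_epsilon binary_list → Pre_calculate_gamma_epsilon binary_list → Spec_calculate_gamma_epsilon binary_list (calculate_gamma_epsilon binary_list)

-- ===== LEMMAS AND PROOFS =====

-- value of a digit list, most-significant first: the common spec of A's positional sum and B's Horner fold
def pvVal {α : Type} (t : α → Int) : List α → Int
  | [] => 0
  | c :: s => t c * 2 ^ s.length + pvVal t s

-- Set/Dict key invariants for A's uniques/counts loop
theorem pvSetInvFresh (u : PySem.Set Char) (d : PySem.Dict Char Int)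
    (h : ∀ c, u.contains c = d.contains c) (n : Char) (v : Int) :
    ∀ c, (u.add n).contains c = (d.insert n v).contains c := by
  intro c
  rw [PySem.Dict.contains_insert]
  by_cases hcn : c = n
  · subst hcn
    simp [PySem.Set.contains_eq_listContains, PySem.Set.mem_add]
  · have hc := h c
    simp only [PySem.Set.contains_eq_listContains, List.contains_eq_mem, PySem.Set.mem_add,
      Bool.decide_or] at *
    simp [hcn, hc]

theorem pvSetInvStale (u : PySem.Set Char) (d : PySem.Dict Char Int)
    (h : ∀ c, u.contains c = d.contains c) (n : Char) (hn : u.contains n = true) (v : Int) :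
    ∀ c, u.contains c = (d.insert n v).contains c := by
  intro c
  rw [PySem.Dict.contains_insert]
  by_cases hcn : c = n
  · subst hcn
    simp only [PySem.Set.contains_eq_listContains, List.contains_eq_mem] at hn ⊢
    simp [hn]
  · have hc := h c
    simp only [PySem.Set.contains_eq_listContains, List.contains_eq_mem] at hc ⊢
    simp [hcn, hc]

-- A's uniques/counts loop builds the counter dict: both branches are the counter bump
theorem pvCountsLoop (numbers : List Char) (u : PySem.Set Char) (d : PySem.Dict Char Int)
    (h : ∀ c, u.contains c = d.contains c) :
    (numbers.foldl
      (fun (st : PySem.Set Char × PySem.Dict Char Int) n =>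
        if st.1.contains n = false then (st.1.add n, st.2.insert n 1)
        else (st.1, st.2.modify n 0 (· + 1)))
      (u, d)).2
    = numbers.foldl (fun d n => d.insert n (d.getD n 0 + 1)) d := by
  induction numbers generalizing u d with
  | nil => rfl
  | cons n t ih =>
    simp only [List.foldl_cons]
    by_cases hc : u.contains n = false
    · simp only [hc, if_pos]
      have hd : d.contains n = false := by rw [← h]; exact hc
      have hget : d.getD n 0 = 0 := by
        have := (PySem.Dict.get?_eq_none_iff_contains d n).mpr hd
        simp [PySem.Dict.getD_eq_get?_getD, this]
      rw [hget]
      exact ih _ _ (pvSetInvFresh u d h n 1)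
    · simp only [hc]
      have hmod : d.modify n 0 (· + 1) = d.insert n (d.getD n 0 + 1) := PySem.Dict.ext_iff.mpr rfl
      rw [hmod]
      exact ih _ _ (pvSetInvStale u d h n (by simpa using hc) _)

theorem pvMode_eq (numbers : List Char) (ty : String) :
    pvBinaryMode numbers ty =
      (if ty == "most" then
        (PySem.List.max? (PySem.Dict.counter numbers).keys
          (fun k => (PySem.Dict.counter numbers).getD k 0)).getD ' '
      else
        (PySem.List.min? (PySem.Dict.counter numbers).keys
          (fun k => (PySem.Dict.counter numbers).getD k 0)).getD ' ') := by
  simp only [pvBinaryMode]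
  rw [pvCountsLoop numbers _ _ (by intro c; simp [PySem.Set.contains_eq_listContains])]
  rw [PySem.Dict.foldl_insert_getD_add_one_eq_counter]

theorem pvFoldPairAppend {α : Type} (l : List α) (f g : α → Char) (a b : List Char) :
    l.foldl (fun (ml : List Char × List Char) x => (ml.1 ++ [f x], ml.2 ++ [g x])) (a, b)
      = (a ++ l.map f, b ++ l.map g) := by
  induction l generalizing a b with
  | nil => simp
  | cons x t ih => simp [ih]

theorem pvFoldPairSplit {α : Type} (l : List α) (f g : α → Int) (a b : Int) :
    l.foldl (fun (p : Int × Int) x => (2 * p.1 + f x, 2 * p.2 + g x)) (a, b)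
      = (l.foldl (fun acc x => 2 * acc + f x) a, l.foldl (fun acc x => 2 * acc + g x) b) := by
  induction l generalizing a b with
  | nil => rfl
  | cons x t ih => simp [ih]

theorem pvHorner {α : Type} (t : α → Int) (l : List α) (a : Int) :
    l.foldl (fun acc x => 2 * acc + t x) a = a * 2 ^ l.length + pvVal t l := by
  induction l generalizing a with
  | nil => simp [pvVal]
  | cons x s ih =>
    simp only [List.foldl_cons, ih, pvVal, List.length_cons]
    ring

theorem pvVal_map {α β : Type} (t : β → Int) (g : α → β) (l : List α) :
    pvVal t (l.map g) = pvVal (fun x => t (g x)) l := by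
  induction l with
  | nil => rfl
  | cons x s ih => simp [pvVal, ih]

theorem pvVal_congr {α : Type} {t t' : α → Int} {l : List α} (h : ∀ x ∈ l, t x = t' x) :
    pvVal t l = pvVal t' l := by
  induction l with
  | nil => rfl
  | cons x s ih => simp [pvVal, h x (by simp), ih (fun y hy => h y (by simp [hy]))]

theorem pvBinaryToDecimal_eq (chars : List Char) :
    pvBinaryToDecimal chars = pvVal pvIntOfChar chars := by
  simp only [pvBinaryToDecimal, PySem.List.pyRange_zero_natCast, List.foldl_map,
    PySem.List.foldl_add, zero_add]
  induction chars with
  | nil => simp [pvVal]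
  | cons c s ih =>
    rw [List.length_cons, List.range_succ, List.map_append, List.sum_append]
    simp only [List.map_cons, List.map_nil, List.sum_cons, List.sum_nil, add_zero]
    have hlast : ((s.length + 1 : Nat) : Int) - (s.length : Int) - 1 = 0 := by push_cast; ring
    rw [pvVal]
    have hmap : ∀ k ∈ List.range s.length,
        pvIntOfChar ((PySem.List.pyGet? (c :: s) (((s.length + 1 : Nat) : Int) - (k : Int) - 1)).getD ' ') * 2 ^ ((k : Int)).toNat
        = pvIntOfChar ((PySem.List.pyGet? s (((s.length : Nat) : Int) - (k : Int) - 1)).getD ' ') * 2 ^ ((k : Int)).toNat := by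
      intro k hk
      rw [List.mem_range] at hk
      have h1 : ((s.length + 1 : Nat) : Int) - (k : Int) - 1 = ((s.length - k : Nat) : Int) := by
        push_cast [Nat.cast_sub hk.le]; ring
      have h2 : ((s.length : Nat) : Int) - (k : Int) - 1 = ((s.length - k - 1 : Nat) : Int) := by
        push_cast [Nat.cast_sub hk.le, Nat.cast_sub (by omega : 1 ≤ s.length - k)]; ring
      rw [h1, h2]
      congr 2
      rw [PySem.List.pyGet?_natCast, PySem.List.pyGet?_natCast]
      have : s.length - k = (s.length - k - 1) + 1 := by omega
      rw [this, List.getElem?_cons_succ]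
      simp
    rw [List.map_congr_left hmap, ih]
    have : PySem.List.pyGet? (c :: s) (((s.length + 1 : Nat) : Int) - (s.length : Int) - 1) = some c := by
      rw [hlast]
      rw [show (0 : Int) = ((0 : Nat) : Int) from rfl, PySem.List.pyGet?_natCast]
      rfl
    rw [this]
    simp [Int.toNat_natCast]
    ring

theorem pvColsLoop (rows : List String) (cs : List (PySem.Dict Char Int))
    (h : ∀ r ∈ rows, cs.length ≤ r.toList.length) :
    rows.foldl
      (fun (cols : List (PySem.Dict Char Int)) row =>
        (cols.zip row.toList).map (fun p => p.1.insert p.2 (p.1.getD p.2 0 + 1)))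
      cs
    = (List.range cs.length).map (fun i =>
        (rows.map (fun r => r.toList.getD i ' ')).foldl
          (fun d c => d.insert c (d.getD c 0 + 1)) (cs.getD i PySem.Dict.empty)) := by
  induction rows generalizing cs with
  | nil =>
    simp only [List.foldl_nil, List.map_nil]
    refine List.ext_getElem (by simp) ?_
    intro i h1 h2
    simp only [List.getElem_map, List.getElem_range]
    rw [List.getD_eq_getElem _ _ h1]
  | cons r rs ih =>
    simp only [List.foldl_cons, List.map_cons]
    have hlen : ((cs.zip r.toList).map (fun p => p.1.insert p.2 (p.1.getD p.2 0 + 1))).length = cs.length := by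
      have h0 : cs.length ≤ r.toList.length := h r (by simp)
      simp only [List.length_map, List.length_zip]
      omega
    rw [ih _ (by intro x hx; rw [hlen]; exact h x (by simp [hx]))]
    rw [hlen]
    refine List.map_congr_left (fun i hi => ?_)
    rw [List.mem_range] at hi
    have hr : i < r.toList.length := lt_of_lt_of_le hi (h r (by simp))
    have hzi : i < ((cs.zip r.toList).map (fun p => p.1.insert p.2 (p.1.getD p.2 0 + 1))).length := by
      rw [hlen]; exact hi
    rw [List.getD_eq_getElem _ _ hzi, List.getD_eq_getElem _ _ hi, List.getD_eq_getElem _ _ hr]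
    simp [List.getElem_zip]

theorem pvParseList_eq (binary_list : List String) (i : Nat)
    (h : ∀ r ∈ binary_list, i < r.toList.length) :
    pvParseList binary_list (i : Int) = binary_list.map (fun r => r.toList.getD i ' ') := by
  unfold pvParseList pvParseNumber
  refine List.map_congr_left (fun r hr => ?_)
  rw [PySem.Str.pyGet?_natCast]
  simp [List.getElem?_eq_getElem (h r hr)]

-- ===== VERDICT (by name: the statement is the Claim_ definition above) =====
theorem calculate_gamma_epsilon_spec : Claim_equal_calculate_gamma_epsilon := by
  intro bl _ hpre
  unfold Spec_calculate_gamma_epsilon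
  obtain ⟨hne, hall⟩ := hpre
  simp only [calculate_gamma_epsilon, calculate_gamma_epsilon_alt]
  rw [PySem.List.pyRange_zero_natCast, List.foldl_map, pvFoldPairAppend, List.nil_append,
    List.nil_append]
  have hw : ∀ r ∈ bl, (bl.headD "").toList.length ≤ r.toList.length := fun r hr => (hall r hr).1
  rw [pvColsLoop bl _ (by simpa using hw)]
  rw [List.length_replicate]
  have hcols :
      (List.range (bl.headD "").toList.length).map (fun i =>
        (bl.map (fun r => r.toList.getD i ' ')).foldl
          (fun d c => d.insert c (d.getD c 0 + 1))
          ((List.replicate (bl.headD "").toList.length PySem.Dict.empty).getD i PySem.Dict.empty))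
      = (List.range (bl.headD "").toList.length).map (fun i =>
          PySem.Dict.counter (bl.map (fun r => r.toList.getD i ' '))) := by
    refine List.map_congr_left (fun i hi => ?_)
    rw [List.mem_range] at hi
    rw [List.getD_eq_getElem _ _ (by simpa using hi), List.getElem_replicate,
      PySem.Dict.foldl_insert_getD_add_one_eq_counter]
  rw [hcols, pvFoldPairSplit, List.foldl_map, List.foldl_map, pvHorner, pvHorner, zero_mul,
    zero_add, zero_add, pvBinaryToDecimal_eq, pvBinaryToDecimal_eq]
  simp only [pvVal_map]
  have hmost : pvVal (fun (y : Nat) => pvIntOfChar (pvBinaryMode (pvParseList bl (y : Int)) "most"))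
      (List.range (bl.headD "").toList.length)
      = pvVal (fun y => pvIntOfChar
          ((PySem.List.max? (PySem.Dict.counter (List.map (fun r => r.toList.getD y ' ') bl)).keys
            (fun k => (PySem.Dict.counter (List.map (fun r => r.toList.getD y ' ') bl)).getD k 0)).getD ' '))
        (List.range (bl.headD "").toList.length) := by
    refine pvVal_congr (fun i hi => ?_)
    rw [List.mem_range] at hi
    rw [pvParseList_eq bl i (fun r hr => lt_of_lt_of_le hi (hw r hr)), pvMode_eq]
    simp
  have hleast : pvVal (fun (y : Nat) => pvIntOfChar (pvBinaryMode (pvParseList bl (y : Int)) "least"))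
      (List.range (bl.headD "").toList.length)
      = pvVal (fun y => pvIntOfChar
          ((PySem.List.min? (PySem.Dict.counter (List.map (fun r => r.toList.getD y ' ') bl)).keys
            (fun k => (PySem.Dict.counter (List.map (fun r => r.toList.getD y ' ') bl)).getD k 0)).getD ' '))
        (List.range (bl.headD "").toList.length) := by
    refine pvVal_congr (fun i hi => ?_)
    rw [List.mem_range] at hi
    rw [pvParseList_eq bl i (fun r hr => lt_of_lt_of_le hi (hw r hr)), pvMode_eq]
    simp
  rw [hmost, hleast]
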